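-- pv_equiv track=rewrite | github.com/MQFacultyOfArts/PromptGrimoireTool | scripts/classify_slot_errors.py | _aggregate_by_file
-- ===== SOURCE A (Python) =====
-- def _aggregate_by_file(
--     call_chains: dict[str, list[str]],
-- ) -> dict[str, int]:
--     """Count error-seconds where any frame references each file.
--
--     An error-second is counted for a file if ANY chain frame contains
--     that filename. One error-second can count for multiple files if its
--     chain spans multiple files.
--     """
--     file_counts: dict[str, set[str]] = {}
--     for chain, timestamps in call_chains.items():
--         # Extract unique filenames from the chain
--         files = {part.rsplit(":", 1)[0] for part in chain.split(" -> ") if "/" in part}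
--         for fname in files:
--             file_counts.setdefault(fname, set()).update(timestamps)
--     return {f: len(ts) for f, ts in file_counts.items()}
-- ===== SOURCE B (Python) =====
-- def _aggregate_by_file(
--     call_chains: dict[str, list[str]],
-- ) -> dict[str, int]:
--     """Two-stage group-then-aggregate: first build an inverted index from
--     filename to the chains that mention it, then count each file's distinct
--     timestamps by looking its chains back up in call_chains."""
--     # stage 1: inverted index file -> chains whose frames mention it
--     index: dict[str, list[str]] = {}
--     for chain in call_chains:
--         for part in chain.split(" -> "):
--             if "/" in part:
--                 index.setdefault(part.rsplit(":", 1)[0], []).append(chain)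
--     # stage 2: count distinct timestamps across each file's chains
--     return {
--         fname: len({ts for chain in chains for ts in call_chains[chain]})
--         for fname, chains in index.items()
--     }
-- ===== Notes on version B (the rewrite author's own statement) =====
-- stated objective: alternative
-- what changed: A makes one pass that incrementally maintains a set of timestamps per file and takes len at the end; B is a two-stage group-then-aggregate: it first builds an inverted index from filename to the chains mentioning it (no sets, no timestamps touched), then counts each file's distinct timestamps by looking its chains back up in call_chains.
import Mathlib
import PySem

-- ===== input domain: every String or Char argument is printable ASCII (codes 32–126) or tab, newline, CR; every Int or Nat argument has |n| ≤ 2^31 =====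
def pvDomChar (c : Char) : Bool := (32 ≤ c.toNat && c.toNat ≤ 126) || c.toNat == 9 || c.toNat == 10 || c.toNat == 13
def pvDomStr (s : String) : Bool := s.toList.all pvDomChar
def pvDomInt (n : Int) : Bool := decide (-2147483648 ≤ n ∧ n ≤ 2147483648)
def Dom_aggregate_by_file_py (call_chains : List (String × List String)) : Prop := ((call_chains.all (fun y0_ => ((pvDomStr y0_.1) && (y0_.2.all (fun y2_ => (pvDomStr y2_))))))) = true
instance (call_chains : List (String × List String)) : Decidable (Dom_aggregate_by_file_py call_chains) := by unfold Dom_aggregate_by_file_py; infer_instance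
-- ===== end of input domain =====

-- B replaces A's incremental per-file timestamp sets by a two-stage group-then-aggregate:
-- an inverted index file -> chains first, then a distinct-timestamp count per file via
-- lookups back into call_chains; objective: alternative.


-- ===== PORT A =====
-- part.rsplit(":", 1)[0]: everything before the LAST ':' (the whole string if there is none).
-- Ported by hand via rfind + slice (exact: rsplit with maxsplit 1 splits at the last separator).
def pvFname (part : String) : String :=
  let i := PySem.Str.rfind part ":"
  if i = -1 then part else PySem.Str.slice part none (some i)

-- chain.split(" -> ") is PySem.Str.split?; the separator is the nonempty literal " -> ",
-- so split? is always `some` and the `.getD []` default is never taken.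
-- literal port of _aggregate_by_file: per-file SETS of timestamps, len at the end.
-- (the Python iterates the per-chain set `files` in hash order; the resulting dict is
-- order-insensitive data, ported in first-insertion order)
def aggregate_by_file_py (call_chains : List (String × List String)) : List (String × Int) :=
  let file_counts : PySem.Dict String (PySem.Set String) :=
    call_chains.foldl (fun fc c =>
      let files : PySem.Set String :=
        PySem.Set.ofList
          ((((PySem.Str.split? c.1 " -> ").getD []).filter (fun part => PySem.Str.isIn "/" part)).map
            pvFname)
      -- file_counts.setdefault(fname, set()).update(timestamps)  (in-place update = modify)
      files.foldl (fun fc fname =>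
        fc.modify fname PySem.Set.empty (fun s => PySem.Set.update s c.2)) fc)
      PySem.Dict.empty
  file_counts.items.map (fun p => (p.1, (PySem.Set.len p.2 : Int)))

-- ===== PORT B =====
-- port of B: stage 1 builds the inverted index file -> chains (setdefault+append = modify with
-- default []); stage 2 counts distinct timestamps per file by looking each chain back up in
-- call_chains (dict lookup = first match; the KeyError branch of call_chains[chain] is
-- unreachable — every stored chain is a key — so it is ported with default []).
def aggregate_by_file_py_alt (call_chains : List (String × List String)) : List (String × Int) :=
  let index : PySem.Dict String (List String) :=
    call_chains.foldl (fun idx c =>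
      ((PySem.Str.split? c.1 " -> ").getD []).foldl (fun idx part =>
        if PySem.Str.isIn "/" part then
          idx.modify (pvFname part) [] (· ++ [c.1])
        else idx) idx)
      PySem.Dict.empty
  index.items.map (fun p =>
    (p.1, (PySem.Set.len (PySem.Set.ofList (p.2.flatMap
      (fun ch => (PySem.Dict.mk call_chains).getD ch []))) : Int)))

-- ===== PRECONDITION & SPEC =====
-- Pre_ excludes association lists with duplicate chain keys: they do not represent any Python
-- dict input (Python dict keys are unique), and B's stage-2 lookup relies on key uniqueness.
def Pre_aggregate_by_file_py (call_chains : List (String × List String)) : Prop :=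
  (call_chains.map Prod.fst).Nodup
instance (call_chains : List (String × List String)) : Decidable (Pre_aggregate_by_file_py call_chains) := by unfold Pre_aggregate_by_file_py; infer_instance

def pvWitness_aggregate_by_file_py : (List (String × List String)) :=
  [("a/b.py:1 -> c/d.py:2", ["t1", "t2"]), ("a/b.py:3", ["t1"])]

def Spec_aggregate_by_file_py (call_chains : List (String × List String)) (out : List (String × Int)) : Prop := out = aggregate_by_file_py_alt call_chains
instance (call_chains : List (String × List String)) (out : List (String × Int)) : Decidable (Spec_aggregate_by_file_py call_chains out) := by unfold Spec_aggregate_by_file_py; infer_instance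

-- ===== CLAIM (what is proved, stated in full; the proofs are below) =====
def Claim_equal_aggregate_by_file_py : Prop := ∀ (call_chains : List (String × List String)), Dom_aggregate_by_file_py call_chains → Pre_aggregate_by_file_py call_chains → Spec_aggregate_by_file_py call_chains (aggregate_by_file_py call_chains)

-- ===== LEMMAS AND PROOFS =====

-- proof-side names for the loop bodies, the per-chain filename list, and the stage-2 lookup
def pvTsOf (ccs : List (String × List String)) (ch : String) : List String :=
  (PySem.Dict.mk ccs).getD ch []

def pvParts (s : String) : List String :=
  (((PySem.Str.split? s " -> ").getD []).filter (fun part => PySem.Str.isIn "/" part)).map pvFname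

def pvPairLen (p : String × PySem.Set String) : String × Int := (p.1, (PySem.Set.len p.2 : Int))

def pvAstep (tss : List String) (fc : PySem.Dict String (PySem.Set String)) (f : String) :
    PySem.Dict String (PySem.Set String) :=
  fc.modify f PySem.Set.empty (fun s => PySem.Set.update s tss)

def pvBstep (ch : String) (idx : PySem.Dict String (List String)) (f : String) :
    PySem.Dict String (List String) :=
  idx.modify f [] (· ++ [ch])

-- the simulation map from B's index entries to A's dict-of-sets entries
def pvG (ccs : List (String × List String)) (p : String × List String) :
    String × PySem.Set String :=
  (p.1, PySem.Set.ofList (p.2.flatMap (pvTsOf ccs)))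

def pvInv (ccs : List (String × List String)) (fc : PySem.Dict String (PySem.Set String))
    (idx : PySem.Dict String (List String)) : Prop :=
  fc.items = idx.items.map (pvG ccs) ∧ fc.keys.Nodup

lemma pvModify_eq {κ ν : Type} [BEq κ] (d : PySem.Dict κ ν) (k : κ) (d0 : ν) (g : ν → ν) :
    d.modify k d0 g = d.insert k (g (d.getD k d0)) := rfl

lemma pvInv_keys {ccs : List (String × List String)} {fc : PySem.Dict String (PySem.Set String)}
    {idx : PySem.Dict String (List String)} (h : pvInv ccs fc idx) : fc.keys = idx.keys := by
  simp only [PySem.Dict.keys, h.1, List.map_map]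
  rfl

lemma pvInv_contains {ccs : List (String × List String)}
    {fc : PySem.Dict String (PySem.Set String)} {idx : PySem.Dict String (List String)}
    (h : pvInv ccs fc idx) (g : String) : fc.contains g = idx.contains g := by
  rw [Bool.eq_iff_iff, PySem.Dict.contains_iff_mem_keys, PySem.Dict.contains_iff_mem_keys,
    pvInv_keys h]

lemma pvInsert_self {ν : Type} {fc : PySem.Dict String ν} {f : String} {s : ν}
    (hg : fc.get? f = some s) (hnd : fc.keys.Nodup) : fc.insert f s = fc := by
  have hc : fc.contains f = true := by
    cases hc : fc.contains f
    · rw [(PySem.Dict.get?_eq_none_iff_contains fc f).mpr hc] at hg; cases hg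
    · rfl
  apply PySem.Dict.ext
  rw [PySem.Dict.items_insert_of_contains _ _ hc]
  conv_rhs => rw [← List.map_id fc.items]
  apply List.map_congr_left
  rintro ⟨p1, p2⟩ hp
  by_cases hpf : p1 = f
  · subst hpf
    have hthis : fc.get? p1 = some p2 := PySem.Dict.get?_of_mem_items fc hp hnd
    rw [hg] at hthis
    simp [Option.some.inj hthis]
  · simp [hpf]

-- "f already carries every timestamp of tss" — makes a later pvAstep at f a no-op
def pvQ (tss : List String) (f : String) (fc : PySem.Dict String (PySem.Set String)) : Prop :=
  ∃ s, fc.get? f = some s ∧ ∀ t ∈ tss, t ∈ s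

lemma pvQ_Astep_self (tss : List String) (f : String) (fc : PySem.Dict String (PySem.Set String)) :
    pvQ tss f (pvAstep tss fc f) := by
  refine ⟨PySem.Set.update (fc.getD f PySem.Set.empty) tss, ?_, ?_⟩
  · rw [pvAstep, pvModify_eq]; exact PySem.Dict.get?_insert_self fc f _
  · intro t ht
    exact (PySem.Set.mem_update _ _ _).mpr (Or.inr ht)

lemma pvQ_Astep_mono {tss : List String} {f : String} {fc : PySem.Dict String (PySem.Set String)}
    (g : String) (h : pvQ tss f fc) : pvQ tss f (pvAstep tss fc g) := by
  by_cases hfg : f = g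
  · subst hfg; exact pvQ_Astep_self tss f fc
  · obtain ⟨s, hg, hsub⟩ := h
    refine ⟨s, ?_, hsub⟩
    rw [pvAstep, pvModify_eq, PySem.Dict.get?_insert, if_neg hfg]
    exact hg

lemma pvQ_foldl_mono (tss : List String) (f : String) :
    ∀ (l : List String) (fc : PySem.Dict String (PySem.Set String)),
      pvQ tss f fc → pvQ tss f (l.foldl (pvAstep tss) fc) := by
  intro l
  induction l with
  | nil => intro fc h; exact h
  | cons g rest ih => intro fc h; exact ih _ (pvQ_Astep_mono g h)

lemma pvQ_foldl_mem (tss : List String) (f : String) :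
    ∀ (l : List String) (fc : PySem.Dict String (PySem.Set String)),
      f ∈ l → pvQ tss f (l.foldl (pvAstep tss) fc) := by
  intro l
  induction l with
  | nil => intro fc h; cases h
  | cons g rest ih =>
    intro fc h
    rcases List.mem_cons.mp h with h | h
    · subst h
      exact pvQ_foldl_mono tss f rest _ (pvQ_Astep_self tss f fc)
    · exact ih _ h

lemma pvAstep_nodup {tss : List String} {fc : PySem.Dict String (PySem.Set String)} (f : String)
    (h : fc.keys.Nodup) : (pvAstep tss fc f).keys.Nodup := by
  rw [pvAstep, pvModify_eq]
  cases hc : fc.contains f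
  · rw [PySem.Dict.keys_insert_of_not_contains _ _ hc]
    have hf : f ∉ fc.keys := fun hmem => by
      rw [(PySem.Dict.contains_iff_mem_keys fc f).mpr hmem] at hc; cases hc
    rw [List.nodup_append]
    refine ⟨h, List.nodup_singleton f, ?_⟩
    intro a ha b hb hab
    exact hf ((hab.trans (List.mem_singleton.mp hb)) ▸ ha)
  · rw [PySem.Dict.keys_insert_of_contains _ _ hc]; exact h

lemma pvNodup_foldl (tss : List String) :
    ∀ (l : List String) (fc : PySem.Dict String (PySem.Set String)),
      fc.keys.Nodup → (l.foldl (pvAstep tss) fc).keys.Nodup := by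
  intro l
  induction l with
  | nil => intro fc h; exact h
  | cons g rest ih => intro fc h; exact ih _ (pvAstep_nodup g h)

lemma pvAstep_of_Q {tss : List String} {f : String} {fc : PySem.Dict String (PySem.Set String)}
    (h : pvQ tss f fc) (hnd : fc.keys.Nodup) : pvAstep tss fc f = fc := by
  obtain ⟨s, hg, hsub⟩ := h
  rw [pvAstep, pvModify_eq, PySem.Dict.getD_of_get?_eq_some fc PySem.Set.empty hg]
  have hupd : PySem.Set.update s tss = s := by
    rw [PySem.Set.update_eq_append_filter]
    have : (PySem.Set.ofList tss).filter (fun y => !(PySem.Set.contains s y)) = [] := by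
      rw [List.filter_eq_nil_iff]
      intro y hy
      have hys : y ∈ s := hsub y ((PySem.Set.mem_ofList _ _).mp hy)
      simp [hys]
    rw [this, List.append_nil]
  rw [hupd]
  exact pvInsert_self hg hnd

-- A may process the deduplicated per-chain filename set: duplicates are no-ops
lemma pvA_foldl_dedup (tss : List String) :
    ∀ (l : List String) (fc : PySem.Dict String (PySem.Set String)), fc.keys.Nodup →
      (PySem.Set.ofList l).foldl (pvAstep tss) fc = l.foldl (pvAstep tss) fc := by
  intro l
  induction l using List.reverseRecOn with
  | nil => intro fc _; rfl
  | append_singleton l x ih =>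
    intro fc hnd
    rw [PySem.Set.ofList_append_singleton, List.foldl_append]
    by_cases hx : x ∈ l
    · rw [PySem.Set.add_of_mem ((PySem.Set.mem_ofList _ _).mpr hx), ih fc hnd]
      exact (pvAstep_of_Q (pvQ_foldl_mem tss x l fc hx) (pvNodup_foldl tss l fc hnd)).symm
    · rw [PySem.Set.add_of_not_mem (fun hc => hx ((PySem.Set.mem_ofList _ _).mp hc)),
        List.foldl_append, ih fc hnd]

-- per-file lockstep: A's set-update step simulates B's chain-append step through pvG
lemma pvStep {ccs : List (String × List String)} {ch : String} {tss : List String}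
    {fc : PySem.Dict String (PySem.Set String)} {idx : PySem.Dict String (List String)}
    (hts : pvTsOf ccs ch = tss) (h : pvInv ccs fc idx) (f : String) :
    pvInv ccs (pvAstep tss fc f) (pvBstep ch idx f) := by
  constructor
  · show (pvAstep tss fc f).items = ((pvBstep ch idx f).items).map (pvG ccs)
    rw [pvAstep, pvBstep, pvModify_eq, pvModify_eq]
    cases hc : fc.contains f
    · -- f is new on both sides
      have hcB : idx.contains f = false := by rw [← pvInv_contains h, hc]
      rw [PySem.Dict.getD_of_not_contains _ _ hc, PySem.Dict.getD_of_not_contains _ _ hcB,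
        PySem.Dict.items_insert_of_not_contains _ _ hc,
        PySem.Dict.items_insert_of_not_contains _ _ hcB, List.map_append, h.1]
      simp [pvG, hts]
      rfl
    · -- f already present on both sides
      obtain ⟨s, hg⟩ : ∃ s, fc.get? f = some s := by
        cases hgs : fc.get? f
        · rw [(PySem.Dict.get?_eq_none_iff_contains fc f).mp hgs] at hc; cases hc
        · exact ⟨_, rfl⟩
      have hcB : idx.contains f = true := by rw [← pvInv_contains h, hc]
      have hndB : idx.keys.Nodup := by rw [← pvInv_keys h]; exact h.2
      -- locate f's entry in the index and relate it to A's set s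
      have hmemA : (f, s) ∈ fc.items := PySem.Dict.mem_items_of_get?_eq_some fc hg
      rw [h.1] at hmemA
      obtain ⟨p, hp, hgp⟩ := List.mem_map.mp hmemA
      have hp1 : p.1 = f := congrArg Prod.fst hgp
      have hchs : idx.getD f [] = p.2 := by
        have : (f, p.2) ∈ idx.items := by rw [← hp1]; exact hp
        exact PySem.Dict.getD_of_mem_items idx this hndB []
      have hs : s = PySem.Set.ofList (p.2.flatMap (pvTsOf ccs)) :=
        (congrArg Prod.snd hgp).symm
      have hval : PySem.Set.update (fc.getD f PySem.Set.empty) tss =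
          PySem.Set.ofList ((idx.getD f [] ++ [ch]).flatMap (pvTsOf ccs)) := by
        rw [PySem.Dict.getD_of_get?_eq_some fc PySem.Set.empty hg, hchs, hs, List.flatMap_append,
          PySem.Set.ofList_append]
        simp [hts]
      rw [PySem.Dict.items_insert_of_contains _ _ hc, PySem.Dict.items_insert_of_contains _ _ hcB,
        h.1, List.map_map, List.map_map]
      apply List.map_congr_left
      intro q _
      by_cases hqf : q.1 = f
      · simp only [Function.comp_apply, pvG, hqf, beq_self_eq_true, if_true]
        rw [hval]
      · simp [pvG, hqf]
  · exact pvAstep_nodup f h.2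

lemma pvChain {ccs : List (String × List String)} {ch : String} {tss : List String}
    (hts : pvTsOf ccs ch = tss) :
    ∀ (l : List String) (fc : PySem.Dict String (PySem.Set String))
      (idx : PySem.Dict String (List String)), pvInv ccs fc idx →
      pvInv ccs (l.foldl (pvAstep tss) fc) (l.foldl (pvBstep ch) idx) := by
  intro l
  induction l with
  | nil => intro fc idx h; exact h
  | cons f rest ih => intro fc idx h; exact ih _ _ (pvStep hts h f)

lemma pvMain (ccs : List (String × List String)) :
    ∀ (l : List (String × List String)) (fc : PySem.Dict String (PySem.Set String))
      (idx : PySem.Dict String (List String)),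
      (∀ c ∈ l, pvTsOf ccs c.1 = c.2) → pvInv ccs fc idx →
      pvInv ccs
        (l.foldl (fun fc c => (PySem.Set.ofList (pvParts c.1)).foldl (pvAstep c.2) fc) fc)
        (l.foldl (fun idx c => (pvParts c.1).foldl (pvBstep c.1) idx) idx) := by
  intro l
  induction l with
  | nil => intro fc idx _ h; exact h
  | cons c rest ih =>
    intro fc idx hts h
    rw [List.foldl_cons, List.foldl_cons, pvA_foldl_dedup c.2 (pvParts c.1) fc h.2]
    exact ih _ _ (fun c' hc' => hts c' (List.mem_cons_of_mem _ hc'))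
      (pvChain (hts c List.mem_cons_self) (pvParts c.1) fc idx h)

-- with unique chain keys, looking a chain of ccs back up in ccs returns its timestamps
lemma pvTsOf_mem {ccs : List (String × List String)} (hnd : (ccs.map Prod.fst).Nodup) :
    ∀ c ∈ ccs, pvTsOf ccs c.1 = c.2 := by
  rintro ⟨k, v⟩ hc
  exact PySem.Dict.getD_of_mem_items (PySem.Dict.mk ccs) hc hnd []

lemma pvA_eq (ccs : List (String × List String)) :
    aggregate_by_file_py ccs =
      (ccs.foldl (fun fc c => (PySem.Set.ofList (pvParts c.1)).foldl (pvAstep c.2) fc)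
        PySem.Dict.empty).items.map pvPairLen := rfl

lemma pvB_eq (ccs : List (String × List String)) :
    aggregate_by_file_py_alt ccs =
      ((ccs.foldl (fun idx c => (pvParts c.1).foldl (pvBstep c.1) idx)
        PySem.Dict.empty).items).map (fun p => pvPairLen (pvG ccs p)) := by
  have hfe : (fun (idx : PySem.Dict String (List String)) (c : String × List String) =>
      ((PySem.Str.split? c.1 " -> ").getD []).foldl
        (fun idx part => if PySem.Str.isIn "/" part then pvBstep c.1 idx (pvFname part) else idx)
        idx)
      = (fun idx c => (pvParts c.1).foldl (pvBstep c.1) idx) := by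
    funext idx c
    rw [PySem.List.foldl_if_eq_foldl_filter (fun part => PySem.Str.isIn "/" part)
        (fun idx part => pvBstep c.1 idx (pvFname part)),
      ← List.foldl_map (f := pvFname)]
    rfl
  show ((ccs.foldl (fun (idx : PySem.Dict String (List String)) (c : String × List String) =>
      ((PySem.Str.split? c.1 " -> ").getD []).foldl
        (fun idx part => if PySem.Str.isIn "/" part then pvBstep c.1 idx (pvFname part) else idx)
        idx)
      PySem.Dict.empty).items).map _ = _
  rw [hfe]
  rfl

lemma pvInv_empty (ccs : List (String × List String)) :
    pvInv ccs PySem.Dict.empty PySem.Dict.empty :=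
  ⟨rfl, PySem.Dict.nodup_keys_empty⟩

-- ===== VERDICT (by name: the statement is the Claim_ definition above) =====
theorem aggregate_by_file_py_spec : Claim_equal_aggregate_by_file_py := by
  intro ccs _ hpre
  unfold Spec_aggregate_by_file_py
  rw [pvA_eq, pvB_eq,
    (pvMain ccs ccs PySem.Dict.empty PySem.Dict.empty (pvTsOf_mem hpre) (pvInv_empty ccs)).1,
    List.map_map]
  rfl
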